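-- pv_equiv track=rewrite | github.com/MaureenZOU/traffic_prediction | Preprocessing/ChangeLabel.py | deleteWeekend
-- ===== SOURCE A (Python) =====
-- def deleteWeekend(dataSet,tag):
--
--     weekset=[]
--     for row in dataSet:
--         entry=[]
--         entry.append(row[0])
--         for i in range(0,len(row)):
--             if i!=0 and ((i-1) not in tag):
--                 entry.append(row[i])
--         weekset.append(entry)
--
--     return weekset
-- ===== SOURCE B (Python) =====
-- def deleteWeekend(dataSet, tag):
--     # positions (descending) of the columns to delete: column t+1 for each tagged t >= 0
--     positions = sorted({t + 1 for t in tag if t >= 0}, reverse=True)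
--     weekset = []
--     for row in dataSet:
--         entry = list(row)
--         for p in positions:
--             if p < len(row):
--                 del entry[p]
--         weekset.append(entry)
--     return weekset
-- ===== Notes on version B (the rewrite author's own statement) =====
-- stated objective: faster
-- what changed: Instead of scanning every column of every row with an 'in tag' membership test, B precomputes once the descending-sorted set of drop positions {t+1 : t in tag, t >= 0} and, per row, deletes just those positions from a shallow copy of the row.
-- crash fix: A raises IndexError (row[0]) whenever some row of dataSet is empty; B returns the rows with the tagged columns dropped, the empty row staying empty. — e.g. on deleteWeekend([[], [1, 2]], [0]): A raises IndexError, B returns [[], [1]]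
import Mathlib
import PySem

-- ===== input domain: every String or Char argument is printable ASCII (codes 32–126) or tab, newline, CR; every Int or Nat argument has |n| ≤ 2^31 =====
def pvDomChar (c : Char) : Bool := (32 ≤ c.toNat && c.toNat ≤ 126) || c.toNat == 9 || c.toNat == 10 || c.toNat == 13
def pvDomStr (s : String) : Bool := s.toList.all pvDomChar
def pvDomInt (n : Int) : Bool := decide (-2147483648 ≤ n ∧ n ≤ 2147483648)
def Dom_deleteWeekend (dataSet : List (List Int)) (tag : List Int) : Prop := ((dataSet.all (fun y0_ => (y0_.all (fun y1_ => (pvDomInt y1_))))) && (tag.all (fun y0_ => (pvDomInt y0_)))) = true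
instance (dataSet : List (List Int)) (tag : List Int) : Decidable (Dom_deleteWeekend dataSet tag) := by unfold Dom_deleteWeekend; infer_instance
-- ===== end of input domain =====

-- B deletes tagged columns by mutating a shallow row copy at precomputed descending positions,
-- instead of A's per-column scan with a membership test on every index (objective: faster, measured).


-- ===== PORT A =====
-- literal port of A: for each row, entry = [row[0]], then for i in range(len(row)):
-- if i != 0 and (i-1) not in tag: entry.append(row[i]).  row[0] is in range under Pre_.
def deleteWeekend (dataSet : List (List Int)) (tag : List Int) : List (List Int) :=
  dataSet.foldl
    (fun weekset row =>
      let entry : List Int := []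
      let entry := entry ++ [PySem.List.pyGetD row 0 0]
      let entry := (PySem.List.pyRange 0 (row.length : Int) 1).foldl
        (fun entry i =>
          if i ≠ 0 ∧ (i - 1) ∉ tag then entry ++ [PySem.List.pyGetD row i 0] else entry)
        entry
      weekset ++ [entry])
    []

-- ===== PORT B =====
-- positions = sorted({t + 1 for t in tag if t >= 0}, reverse=True)
def pvPositions (tag : List Int) : List Int :=
  PySem.List.sorted
    (PySem.Set.ofList ((tag.filter (fun t => decide (0 ≤ t))).map (fun t => t + 1)))
    (fun x => x) true
-- for each row: entry = list(row); for p in positions: if p < len(row): del entry[p].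
-- `del entry[p]` is ported as eraseIdx p.toNat — exact here since 0 ≤ p and, whenever the
-- guard fires, p is a valid index of the current entry (positions are descending).
def deleteWeekend_alt (dataSet : List (List Int)) (tag : List Int) : List (List Int) :=
  let positions := pvPositions tag
  dataSet.foldl
    (fun weekset row =>
      let entry := positions.foldl
        (fun entry p => if p < (row.length : Int) then entry.eraseIdx p.toNat else entry)
        row
      weekset ++ [entry])
    []

-- ===== PRECONDITION & SPEC =====
-- Pre_ excludes exactly the inputs where A raises: any empty row makes row[0] an IndexError.
def Pre_deleteWeekend (dataSet : List (List Int)) (tag : List Int) : Prop :=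
  ∀ row ∈ dataSet, row ≠ []
instance (dataSet : List (List Int)) (tag : List Int) : Decidable (Pre_deleteWeekend dataSet tag) := by unfold Pre_deleteWeekend; infer_instance
def pvWitness_deleteWeekend : List (List Int) × List Int := ([[1, 2, 3], [4, 5, 6]], [1])

-- A raises IndexError whenever some row is empty; B returns the rows with the tagged columns
-- dropped (the empty row staying empty).
def Raises_deleteWeekend (dataSet : List (List Int)) (tag : List Int) : Prop :=
  ∃ row ∈ dataSet, row = []
instance (dataSet : List (List Int)) (tag : List Int) : Decidable (Raises_deleteWeekend dataSet tag) := by unfold Raises_deleteWeekend; infer_instance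
def pvRaiseWitness_deleteWeekend : List (List Int) × List Int := ([[], [1, 2]], [0])
def pvRaiseWitnessOut_deleteWeekend : List (List Int) := [[], [1]]

def Spec_deleteWeekend (dataSet : List (List Int)) (tag : List Int) (out : List (List Int)) : Prop := out = deleteWeekend_alt dataSet tag
instance (dataSet : List (List Int)) (tag : List Int) (out : List (List Int)) : Decidable (Spec_deleteWeekend dataSet tag out) := by unfold Spec_deleteWeekend; infer_instance

-- ===== CLAIM (what is proved, stated in full; the proofs are below) =====
def Claim_equal_deleteWeekend : Prop := ∀ (dataSet : List (List Int)) (tag : List Int), Dom_deleteWeekend dataSet tag → Pre_deleteWeekend dataSet tag → Spec_deleteWeekend dataSet tag (deleteWeekend dataSet tag)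
def Claim_raises_deleteWeekend : Prop := (∀ (dataSet : List (List Int)) (tag : List Int), Dom_deleteWeekend dataSet tag → Raises_deleteWeekend dataSet tag → ¬ Pre_deleteWeekend dataSet tag) ∧ (Dom_deleteWeekend (pvRaiseWitness_deleteWeekend.1) (pvRaiseWitness_deleteWeekend.2) ∧ Raises_deleteWeekend (pvRaiseWitness_deleteWeekend.1) (pvRaiseWitness_deleteWeekend.2) ∧ deleteWeekend_alt (pvRaiseWitness_deleteWeekend.1) (pvRaiseWitness_deleteWeekend.2) = pvRaiseWitnessOut_deleteWeekend)

-- ===== LEMMAS AND PROOFS =====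

-- result of dropping from l (indexed from k) every element whose index lies in P
def pvKeep (P : List Int) : List Int → Nat → List Int
  | [], _ => []
  | x :: xs, k => if (k : Int) ∈ P then pvKeep P xs (k + 1) else x :: pvKeep P xs (k + 1)

lemma pvKeep_irrel (p : Int) (P : List Int) :
    ∀ (l : List Int) (k : Nat), (∀ j : Nat, k ≤ j → j < k + l.length → (j : Int) ≠ p) →
      pvKeep (p :: P) l k = pvKeep P l k := by
  intro l
  induction l with
  | nil => intro k _; rfl
  | cons x xs ih =>
      intro k h
      have hk : (k : Int) ≠ p := h k le_rfl (by simp)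
      have hmem : ((k : Int) ∈ p :: P) ↔ ((k : Int) ∈ P) := by
        simp [List.mem_cons, hk]
      have ih' := ih (k + 1) (fun j hj1 hj2 => h j (by omega) (by simpa using by omega))
      simp only [pvKeep, hmem, ih']

lemma pvKeep_of_forall_lt (P : List Int) :
    ∀ (l : List Int) (k : Nat), (∀ q ∈ P, q < (k : Int)) → pvKeep P l k = l := by
  intro l
  induction l with
  | nil => intro k _; rfl
  | cons x xs ih =>
      intro k h
      have hk : (k : Int) ∉ P := fun hm => absurd (h _ hm) (by omega)
      simp only [pvKeep, if_neg hk, ih (k + 1) (fun q hq => lt_trans (h q hq) (by omega))]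

lemma pvKeep_append (P : List Int) :
    ∀ (a b : List Int) (k : Nat),
      pvKeep P (a ++ b) k = pvKeep P a k ++ pvKeep P b (k + a.length) := by
  intro a
  induction a with
  | nil => intro b k; simp [pvKeep]
  | cons x xs ih =>
      intro b k
      simp only [List.cons_append, pvKeep, ih, List.length_cons]
      split_ifs <;> simp [Nat.add_comm, Nat.add_left_comm, Nat.add_assoc]

lemma pvKeep_eraseIdx (p : Int) (P l : List Int)
    (hP : ∀ q ∈ P, q < p) (h0 : 0 ≤ p) (hlt : p.toNat < l.length) :
    pvKeep (p :: P) l 0 = pvKeep P (l.eraseIdx p.toNat) 0 := by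
  set q := p.toNat with hq
  have hpq : (q : Int) = p := Int.toNat_of_nonneg h0
  have hsplit : l = l.take q ++ l[q] :: l.drop (q + 1) := by
    conv_lhs => rw [← List.take_append_drop q l]
    rw [List.drop_eq_getElem_cons hlt]
  have hlen : (l.take q).length = q := List.length_take_of_le (le_of_lt hlt)
  have herase : l.eraseIdx q = l.take q ++ l.drop (q + 1) := List.eraseIdx_eq_take_drop_succ l q
  -- LHS
  have h1 : pvKeep (p :: P) (l.take q) 0 = pvKeep P (l.take q) 0 := by
    apply pvKeep_irrel
    intro j hj1 hj2
    rw [hlen] at hj2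
    omega
  have h2 : pvKeep (p :: P) (l[q] :: l.drop (q + 1)) q =
      pvKeep P (l.drop (q + 1)) (q + 1) := by
    have : (q : Int) ∈ p :: P := by simp [hpq]
    simp only [pvKeep, if_pos this]
    apply pvKeep_irrel
    intro j hj1 hj2
    have := hpq
    omega
  have h3 : pvKeep P (l.drop (q + 1)) (q + 1) = l.drop (q + 1) := by
    apply pvKeep_of_forall_lt
    intro r hr
    have := hP r hr
    omega
  have h4 : pvKeep P (l.drop (q + 1)) q = l.drop (q + 1) := by
    apply pvKeep_of_forall_lt
    intro r hr
    have := hP r hr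
    omega
  calc pvKeep (p :: P) l 0
      = pvKeep (p :: P) (l.take q) 0 ++ pvKeep (p :: P) (l[q] :: l.drop (q + 1)) q := by
        conv_lhs => rw [hsplit]
        rw [pvKeep_append]
        simp [hlen]
    _ = pvKeep P (l.take q) 0 ++ l.drop (q + 1) := by rw [h1, h2, h3]
    _ = pvKeep P (l.take q) 0 ++ pvKeep P (l.drop (q + 1)) q := by rw [h4]
    _ = pvKeep P (l.eraseIdx q) 0 := by
        rw [herase, pvKeep_append, hlen]
        simp

lemma pvLoopB (n : Nat) :
    ∀ (P l : List Int), P.Pairwise (· > ·) → (∀ q ∈ P, 0 ≤ q) → l.length ≤ n →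
      (∀ q ∈ P, q < (n : Int) → q.toNat < l.length) →
      P.foldl (fun e p => if p < (n : Int) then e.eraseIdx p.toNat else e) l = pvKeep P l 0 := by
  intro P
  induction P with
  | nil =>
      intro l _ _ _ _
      simp [pvKeep_of_forall_lt [] l 0 (by simp)]
  | cons p P' ih =>
      intro l hpw hnn hln hidx
      have hgt : ∀ q ∈ P', p > q := (List.pairwise_cons.mp hpw).1
      have hpw' : P'.Pairwise (· > ·) := (List.pairwise_cons.mp hpw).2
      have hnn' : ∀ q ∈ P', 0 ≤ q := fun q hq => hnn q (List.mem_cons_of_mem _ hq)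
      by_cases h : p < (n : Int)
      · have hp0 : 0 ≤ p := hnn p List.mem_cons_self
        have hplt : p.toNat < l.length := hidx p List.mem_cons_self h
        have hstep : (l.eraseIdx p.toNat).length = l.length - 1 := by
          rw [List.length_eraseIdx_of_lt hplt]
        rw [List.foldl_cons, if_pos h]
        rw [ih (l.eraseIdx p.toNat) hpw' hnn' (by omega)
          (fun q hq _ => by
            have h1 := hgt q hq
            have h2 := hnn' q hq
            omega)]
        exact (pvKeep_eraseIdx p P' l hgt hp0 hplt).symm
      · rw [List.foldl_cons, if_neg h]
        rw [ih l hpw' hnn' hln (fun q hq hqn => hidx q (List.mem_cons_of_mem _ hq) hqn)]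
        refine (pvKeep_irrel p P' l 0 ?_).symm
        intro j _ hj2
        intro hj
        omega

lemma mem_pvPositions (tag : List Int) (x : Int) :
    x ∈ pvPositions tag ↔ (1 ≤ x ∧ (x - 1) ∈ tag) := by
  unfold pvPositions
  rw [PySem.List.mem_sorted, PySem.Set.mem_ofList]
  simp only [List.mem_map, List.mem_filter, decide_eq_true_eq]
  constructor
  · rintro ⟨t, ⟨ht, h0⟩, rfl⟩
    exact ⟨by omega, by simpa using ht⟩
  · rintro ⟨h1, h2⟩
    exact ⟨x - 1, ⟨h2, by omega⟩, by ring⟩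

lemma pvPositions_pairwise (tag : List Int) : (pvPositions tag).Pairwise (· > ·) := by
  have h1 : (pvPositions tag).Pairwise (fun a b => (fun x => x) b ≤ (fun x => x) a) :=
    PySem.List.sorted_pairwise_rev _ _
  have h2 : (pvPositions tag).Nodup := by
    have hperm := PySem.List.sorted_perm
      (PySem.Set.ofList ((tag.filter (fun t => decide (0 ≤ t))).map (fun t => t + 1)))
      (fun x : Int => x) true
    exact hperm.nodup_iff.mpr (PySem.Set.nodup_ofList _)
  exact (h1.and h2).imp (fun {a b} h => lt_of_le_of_ne h.1 (Ne.symm h.2))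

lemma pvPositions_pos (tag : List Int) : ∀ q ∈ pvPositions tag, 1 ≤ q := by
  intro q hq
  exact ((mem_pvPositions tag q).mp hq).1

-- A's inner loop from index k ≥ 1 appends exactly the kept elements of row.drop k
lemma pvLoopA (tag row : List Int) :
    ∀ (xs : List Int) (k : Nat) (acc : List Int), 1 ≤ k → row.drop k = xs →
      (PySem.List.pyRange (k : Int) (row.length : Int) 1).foldl
        (fun e i => if i ≠ 0 ∧ (i - 1) ∉ tag then e ++ [PySem.List.pyGetD row i 0] else e) acc
      = acc ++ pvKeep (pvPositions tag) xs k := by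
  intro xs
  induction xs with
  | nil =>
      intro k acc _ hdrop
      have hk : row.length ≤ k := by
        by_contra h
        have := List.drop_eq_nil_iff.mp hdrop
        omega
      rw [PySem.List.pyRange_one_eq_nil (by exact_mod_cast hk)]
      simp [pvKeep]
  | cons x xs' ih =>
      intro k acc hk1 hdrop
      have hklt : k < row.length := by
        have := congrArg List.length hdrop
        simp at this
        omega
      have hget : row[k]? = some x := by
        have h0 : (row.drop k)[0]? = some x := by rw [hdrop]; rfl
        rw [List.getElem?_drop] at h0
        simpa using h0
      have hdrop' : row.drop (k + 1) = xs' := by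
        have : (row.drop k).drop 1 = xs' := by rw [hdrop]; rfl
        simpa [List.drop_drop, Nat.add_comm] using this
      rw [PySem.List.pyRange_one_cons (by exact_mod_cast hklt), List.foldl_cons]
      have hgetD : PySem.List.pyGetD row (k : Int) 0 = x := by
        rw [PySem.List.pyGetD_natCast]
        simp [List.getD, hget]
      have hcast : ((k : Int) + 1) = ((k + 1 : Nat) : Int) := by push_cast; ring
      by_cases hmem : ((k : Int) - 1) ∈ tag
      · have hcond : ¬ ((k : Int) ≠ 0 ∧ ((k : Int) - 1) ∉ tag) := by
          intro h; exact h.2 hmem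
        rw [if_neg hcond, hcast, ih (k + 1) acc (by omega) hdrop']
        have hpos : (k : Int) ∈ pvPositions tag :=
          (mem_pvPositions tag k).mpr ⟨by exact_mod_cast hk1, hmem⟩
        simp [pvKeep, hpos]
      · have hcond : ((k : Int) ≠ 0 ∧ ((k : Int) - 1) ∉ tag) := by
          constructor
          · omega
          · exact hmem
        rw [if_pos hcond, hgetD, hcast, ih (k + 1) (acc ++ [x]) (by omega) hdrop']
        have hpos : (k : Int) ∉ pvPositions tag := by
          intro h
          exact hmem ((mem_pvPositions tag k).mp h).2
        simp [pvKeep, hpos]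

-- the two per-row results coincide on a nonempty row
lemma pvRow_eq (tag : List Int) (row : List Int) (hrow : row ≠ []) :
    (let entry : List Int := []
     let entry := entry ++ [PySem.List.pyGetD row 0 0]
     (PySem.List.pyRange 0 (row.length : Int) 1).foldl
       (fun entry i =>
         if i ≠ 0 ∧ (i - 1) ∉ tag then entry ++ [PySem.List.pyGetD row i 0] else entry)
       entry)
    = (pvPositions tag).foldl
        (fun entry p => if p < (row.length : Int) then entry.eraseIdx p.toNat else entry)
        row := by
  obtain ⟨r0, rt, rfl⟩ := List.exists_cons_of_ne_nil hrow
  -- B side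
  rw [pvLoopB (r0 :: rt).length (pvPositions tag) (r0 :: rt)
    (pvPositions_pairwise tag)
    (fun q hq => le_trans (by omega) (pvPositions_pos tag q hq))
    le_rfl
    (fun q hq hqn => by
      have h1 := pvPositions_pos tag q hq
      omega)]
  -- A side
  have hlen : (0 : Int) < ((r0 :: rt).length : Int) := by simp
  rw [PySem.List.pyRange_one_cons hlen, List.foldl_cons]
  have hcond : ¬ ((0 : Int) ≠ 0 ∧ ((0 : Int) - 1) ∉ tag) := by simp
  rw [if_neg hcond]
  have h1 : ((0 : Int) + 1) = ((1 : Nat) : Int) := by norm_num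
  rw [h1, pvLoopA tag (r0 :: rt) rt 1 ([] ++ [PySem.List.pyGetD (r0 :: rt) 0 0]) le_rfl rfl]
  have hget0 : PySem.List.pyGetD (r0 :: rt) 0 0 = r0 := PySem.List.pyGetD_zero_cons r0 rt 0
  have hpos0 : (0 : Int) ∉ pvPositions tag := by
    intro h
    have := ((mem_pvPositions tag 0).mp h).1
    omega
  simp [pvKeep, hget0, hpos0]

lemma pvFold_eq (tag : List Int) :
    ∀ (dataSet : List (List Int)) (acc : List (List Int)),
      (∀ row ∈ dataSet, row ≠ []) →
      dataSet.foldl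
        (fun weekset row =>
          let entry : List Int := []
          let entry := entry ++ [PySem.List.pyGetD row 0 0]
          let entry := (PySem.List.pyRange 0 (row.length : Int) 1).foldl
            (fun entry i =>
              if i ≠ 0 ∧ (i - 1) ∉ tag then entry ++ [PySem.List.pyGetD row i 0] else entry)
            entry
          weekset ++ [entry]) acc
      = dataSet.foldl
          (fun weekset row =>
            let entry := (pvPositions tag).foldl
              (fun entry p => if p < (row.length : Int) then entry.eraseIdx p.toNat else entry)
              row
            weekset ++ [entry]) acc := by
  intro dataSet
  induction dataSet with
  | nil => intro acc _; rfl
  | cons row rest ih =>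
      intro acc hpre
      rw [List.foldl_cons, List.foldl_cons]
      rw [ih _ (fun r hr => hpre r (List.mem_cons_of_mem _ hr))]
      congr 1
      simp only []
      rw [pvRow_eq tag row (hpre row List.mem_cons_self)]

-- ===== VERDICT (by name: the statement is the Claim_ definition above) =====
theorem deleteWeekend_spec : Claim_equal_deleteWeekend := by
  intro dataSet tag _ hpre
  unfold Spec_deleteWeekend deleteWeekend deleteWeekend_alt
  exact pvFold_eq tag dataSet [] hpre

theorem deleteWeekend_raises : Claim_raises_deleteWeekend := by
  unfold Claim_raises_deleteWeekend
  constructor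
  · intro dataSet tag _ ⟨row, hmem, hnil⟩ hpre
    exact hpre row hmem hnil
  · exact ⟨by decide, ⟨[], by decide⟩, by decide⟩

-- witness self-check: the raise witness indeed lies in Raises_ (read off the proved claim)
theorem pvRaiseWitness_ok :
    Raises_deleteWeekend pvRaiseWitness_deleteWeekend.1 pvRaiseWitness_deleteWeekend.2 := by
  have h := deleteWeekend_raises
  unfold Claim_raises_deleteWeekend at h
  exact h.2.2.1
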